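-- pv_equiv track=rewrite | github.com/Arsen1302/Code-copy-detector | TestData/solutions/problem_950_3.py | solution_950_3
-- ===== SOURCE A (Python) =====
-- def solution_950_3(croakOfFrogs: str) -> int:
--     """Reduction to interval overlap algorithm."""
--     if not croakOfFrogs:
--         return 0
--     from collections import defaultdict
--     positions = defaultdict(list)
--     for i, c in enumerate(croakOfFrogs):
--         positions[c].append(i)
--     num_of_croaks = len(positions["c"])
--     # check length
--     for c in "croak":
--         if num_of_croaks != len(positions[c]):
--             return -1
--     # check order to reduce to interval problem
--     for i in range(num_of_croaks):
--         if positions["c"][i] < positions["r"][i] < \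
--                 positions["o"][i] < positions["a"][i] < positions["k"][i]:
--             continue
--         else:
--             return -1
--     # interval overlap algorithm on c and k without overlap handling
--     max_num = 1
--     current_num = 1
--     # first entry is always a c and irrelevant
--     positions["c"].pop(0)
--     while positions["c"]:
--         # get next interval start
--         current = positions["c"].pop(0)
--         # check if it frees any frogs
--         while current > positions["k"][0]:
--             positions["k"].pop(0)
--             current_num -= 1
--         # account for new frog assignment to c
--         current_num += 1
--         max_num = max(max_num, current_num)
--     return max(max_num, current_num)
-- ===== SOURCE B (Python) =====
-- def solution_950_3(croakOfFrogs: str) -> int: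
--     """Single left-to-right pass keeping running counts of c,r,o,a,k and a
--     running number of active frogs, tracking its maximum.  Characters outside
--     "croak" are ignored (as in the original)."""
--     c = r = o = a = k = 0
--     active = 0
--     ans = 0
--     for ch in croakOfFrogs:
--         if ch == 'c':
--             c += 1
--             active += 1
--             if active > ans:
--                 ans = active
--         elif ch == 'r':
--             r += 1
--             if r > c:
--                 return -1
--         elif ch == 'o':
--             o += 1
--             if o > r:
--                 return -1
--         elif ch == 'a':
--             a += 1
--             if a > o:
--                 return -1
--         elif ch == 'k':
--             k += 1
--             if k > a:
--                 return -1
--             active -= 1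
--     if c == r == o == a == k:
--         return ans
--     return -1
-- ===== Notes on version B (the rewrite author's own statement) =====
-- stated objective: faster
-- what changed: Replaces A's per-letter position lists + per-index order check + interval sweep with repeated pop(0) by a single left-to-right pass keeping running counts of the five croak letters and of the active frogs, tracking the maximum.
import Mathlib
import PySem

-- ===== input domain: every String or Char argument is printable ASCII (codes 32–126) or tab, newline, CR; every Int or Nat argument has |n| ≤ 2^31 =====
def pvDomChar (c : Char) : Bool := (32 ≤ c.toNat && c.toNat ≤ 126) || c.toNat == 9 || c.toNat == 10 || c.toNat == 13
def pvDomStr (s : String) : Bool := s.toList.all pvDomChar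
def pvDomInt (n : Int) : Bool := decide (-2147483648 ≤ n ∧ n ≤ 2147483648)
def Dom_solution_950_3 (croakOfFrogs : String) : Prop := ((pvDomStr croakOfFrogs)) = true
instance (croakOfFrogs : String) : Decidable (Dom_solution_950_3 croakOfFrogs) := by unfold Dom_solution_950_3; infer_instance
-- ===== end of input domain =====

-- B replaces A's position-list construction, index-wise order check and pop(0) interval sweep
-- by one left-to-right pass over the string keeping running letter counts (asymptotically faster).


-- ===== PORT A =====

-- positions = defaultdict(list); for i, c in enumerate(s): positions[c].append(i)
def pvA_positions (l : List Char) : PySem.Dict Char (List Int) :=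
  (PySem.List.enumerate l 0).foldl (fun d p => d.modify p.2 [] (· ++ [p.1])) PySem.Dict.empty

-- inner `while current > positions["k"][0]: positions["k"].pop(0); current_num -= 1`
-- (Python raises IndexError on an empty "k" list; that point is unreachable once the
--  length and order checks have passed, the [] case is only a totality guard)
def pvA_dropFree : List Int → Int → Int → (List Int × Int)
  | [], _, cur => ([], cur)
  | kk :: ks, current, cur =>
      if kk < current then pvA_dropFree ks current (cur - 1) else (kk :: ks, cur)

-- outer `while positions["c"]:` loop
def pvA_sweep : List Int → List Int → Int → Int → Int
  | [], _, maxn, cur => max maxn cur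
  | current :: cs, ks, maxn, cur =>
      let r := pvA_dropFree ks current cur
      pvA_sweep cs r.1 (max maxn (r.2 + 1)) (r.2 + 1)

def solution_950_3 (croakOfFrogs : String) : Int :=
  if croakOfFrogs.toList = [] then 0
  else
    let positions := pvA_positions croakOfFrogs.toList
    let num := (positions.getD 'c' []).length
    if ¬ ("croak".toList.all (fun ch => (positions.getD ch []).length == num)) then -1
    else if ¬ ((List.range num).all (fun i =>
        decide ((positions.getD 'c' []).getD i 0 < (positions.getD 'r' []).getD i 0
          ∧ (positions.getD 'r' []).getD i 0 < (positions.getD 'o' []).getD i 0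
          ∧ (positions.getD 'o' []).getD i 0 < (positions.getD 'a' []).getD i 0
          ∧ (positions.getD 'a' []).getD i 0 < (positions.getD 'k' []).getD i 0))) then -1
    -- positions["c"].pop(0) (IndexError on an empty list is unreachable under Pre_), then the sweep
    else pvA_sweep (positions.getD 'c' []).tail (positions.getD 'k' []) 1 1

-- ===== PORT B =====

-- the single pass: running counts c r o a k, active frogs, running maximum ans
def pvB_loop : List Char → Int → Int → Int → Int → Int → Int → Int → Int
  | [], c, r, o, a, k, _, ans => if c = r ∧ r = o ∧ o = a ∧ a = k then ans else -1
  | ch :: t, c, r, o, a, k, active, ans =>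
      if ch = 'c' then
        pvB_loop t (c + 1) r o a k (active + 1)
          (if active + 1 > ans then active + 1 else ans)
      else if ch = 'r' then
        (if r + 1 > c then -1 else pvB_loop t c (r + 1) o a k active ans)
      else if ch = 'o' then
        (if o + 1 > r then -1 else pvB_loop t c r (o + 1) a k active ans)
      else if ch = 'a' then
        (if a + 1 > o then -1 else pvB_loop t c r o (a + 1) k active ans)
      else if ch = 'k' then
        (if k + 1 > a then -1 else pvB_loop t c r o a (k + 1) (active - 1) ans)
      else pvB_loop t c r o a k active ans

def solution_950_3_alt (croakOfFrogs : String) : Int :=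
  pvB_loop croakOfFrogs.toList 0 0 0 0 0 0 0

-- ===== PRECONDITION & SPEC =====
-- Pre_ excludes exactly the inputs on which A raises IndexError: nonempty strings
-- containing no croak letter at all, where A's pop(0) hits an empty position list.
def Pre_solution_950_3 (croakOfFrogs : String) : Prop :=
  croakOfFrogs.toList = [] ∨ croakOfFrogs.toList.any (fun ch => ch ∈ (['c', 'r', 'o', 'a', 'k'] : List Char)) = true
instance (croakOfFrogs : String) : Decidable (Pre_solution_950_3 croakOfFrogs) := by
  unfold Pre_solution_950_3; infer_instance

def pvWitness_solution_950_3 : String := "croak"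

def Spec_solution_950_3 (croakOfFrogs : String) (out : Int) : Prop := out = solution_950_3_alt croakOfFrogs
instance (croakOfFrogs : String) (out : Int) : Decidable (Spec_solution_950_3 croakOfFrogs out) := by
  unfold Spec_solution_950_3; infer_instance

-- ===== CLAIM (what is proved, stated in full; the proofs are below) =====
def Claim_equal_solution_950_3 : Prop := ∀ (croakOfFrogs : String), Dom_solution_950_3 croakOfFrogs → Pre_solution_950_3 croakOfFrogs → Spec_solution_950_3 croakOfFrogs (solution_950_3 croakOfFrogs)


-- ===== LEMMAS AND PROOFS =====

def pvOcc (ch : Char) : List Char → List Nat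
  | [] => []
  | a :: t => if a = ch then 0 :: (pvOcc ch t).map (· + 1) else (pvOcc ch t).map (· + 1)

theorem pvOcc_length (ch : Char) (l : List Char) : (pvOcc ch l).length = l.count ch := by
  induction l with
  | nil => simp [pvOcc]
  | cons a t ih =>
    by_cases h : a = ch <;> simp [pvOcc, h, ih]

theorem pvOcc_mem (ch : Char) (l : List Char) (x : Nat) :
    x ∈ pvOcc ch l ↔ l[x]? = some ch := by
  induction l generalizing x with
  | nil => simp [pvOcc]
  | cons a t ih =>
    cases x with
    | zero =>
      by_cases h : a = ch <;> simp [pvOcc, h]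
    | succ x =>
      by_cases h : a = ch <;> simp [pvOcc, h, ih]

theorem pvOcc_sorted (ch : Char) (l : List Char) : (pvOcc ch l).Pairwise (· < ·) := by
  induction l with
  | nil => simp [pvOcc]
  | cons a t ih =>
    have hmap : ((pvOcc ch t).map (· + 1)).Pairwise (· < ·) :=
      ih.map _ (fun _ _ h => by omega)
    by_cases h : a = ch <;> simp [pvOcc, h, hmap]

theorem pvOcc_countP (ch : Char) (l : List Char) (m : Nat) :
    (pvOcc ch l).countP (fun x => decide (x < m)) = (l.take m).count ch := by
  induction l generalizing m with
  | nil => simp [pvOcc]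
  | cons a t ih =>
    cases m with
    | zero => simp
    | succ m =>
      have hmap : List.countP ((fun x => decide (x ≤ m)) ∘ fun x => x + 1) (pvOcc ch t)
          = (t.take m).count ch := by
        rw [← ih m]
        exact List.countP_congr (fun x _ => by simp)
      by_cases h : a = ch
      · rw [List.take_succ_cons, List.count_cons]
        simp [pvOcc, h, List.countP_map, hmap]
      · rw [List.take_succ_cons, List.count_cons]
        have hbeq : (a == ch) = false := by simp [h]
        simp [pvOcc, h, List.countP_map, hmap, hbeq]

def pvCnt (l : List Char) (ch : Char) (m : Nat) : Nat := (l.take m).count ch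
def pvOkAt (l : List Char) (m : Nat) : Prop :=
  pvCnt l 'r' m ≤ pvCnt l 'c' m ∧ pvCnt l 'o' m ≤ pvCnt l 'r' m ∧
  pvCnt l 'a' m ≤ pvCnt l 'o' m ∧ pvCnt l 'k' m ≤ pvCnt l 'a' m
def pvOk (l : List Char) : Prop := ∀ m, m ≤ l.length → pvOkAt l m
def pvBal (l : List Char) : Prop :=
  l.count 'r' = l.count 'c' ∧ l.count 'o' = l.count 'c' ∧
  l.count 'a' = l.count 'c' ∧ l.count 'k' = l.count 'c'
def pvVal (l : List Char) (m : Nat) : Int := (pvCnt l 'c' m : Int) - (pvCnt l 'k' m : Int)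
def pvMaxCK (l : List Char) : Int := ((List.range (l.length + 1)).map (pvVal l)).foldl max 0

theorem pvCountP_split (l : List Nat) (p q : Nat → Bool) :
    l.countP p = l.countP (fun a => p a && q a) + l.countP (fun a => p a && !q a) := by
  induction l with
  | nil => simp
  | cons a t ih =>
    simp only [List.countP_cons, ih]
    cases hp : p a <;> cases hq : q a <;> simp <;> omega

theorem pvFoldlMax_le {a b : Int} {t : List Int} (h1 : a ≤ b) (h2 : ∀ y ∈ t, y ≤ b) :
    t.foldl max a ≤ b := by
  induction t generalizing a with
  | nil => exact h1
  | cons y t ih =>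
    exact ih (max_le h1 (h2 y List.mem_cons_self)) (fun z hz => h2 z (List.mem_cons_of_mem _ hz))

theorem pvCount_snoc (q : List Char) (x ch : Char) :
    (q ++ [x]).count ch = q.count ch + (if x = ch then 1 else 0) := by
  by_cases h : x = ch <;> simp [List.count_append, h]

theorem pvCnt_append_le (q l2 : List Char) (ch : Char) (m : Nat) (h : m ≤ q.length) :
    pvCnt (q ++ l2) ch m = pvCnt q ch m := by
  unfold pvCnt
  rw [List.take_append]
  simp [Nat.sub_eq_zero_of_le h]

theorem pvCnt_snoc_top (q : List Char) (x : Char) (t : List Char) (ch : Char) :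
    pvCnt (q ++ x :: t) ch (q.length + 1) = (q ++ [x]).count ch := by
  unfold pvCnt
  rw [List.take_append, List.take_of_length_le (by omega)]
  simp

theorem pvCnt_length (q : List Char) (ch : Char) : pvCnt q ch q.length = q.count ch := by
  simp [pvCnt]

theorem pvCnt_ge_length (q : List Char) (ch : Char) (m : Nat) (h : q.length ≤ m) :
    pvCnt q ch m = q.count ch := by
  simp [pvCnt, List.take_of_length_le h]

theorem pvOkAt_append (q l2 : List Char) (m : Nat) (h : m ≤ q.length) :
    pvOkAt (q ++ l2) m ↔ pvOkAt q m := by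
  simp [pvOkAt, pvCnt_append_le _ _ _ _ h]

theorem pvVal_append (q l2 : List Char) (m : Nat) (h : m ≤ q.length) :
    pvVal (q ++ l2) m = pvVal q m := by
  simp [pvVal, pvCnt_append_le _ _ _ _ h]

theorem pvMaxCK_nil : pvMaxCK [] = 0 := by decide

theorem pvMaxCK_snoc (q : List Char) (x : Char) :
    pvMaxCK (q ++ [x]) = max (pvMaxCK q) (pvVal (q ++ [x]) (q.length + 1)) := by
  unfold pvMaxCK
  have hlen : (q ++ [x]).length = q.length + 1 := by simp
  rw [hlen, List.range_succ, List.map_append, List.foldl_append]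
  have hmaps : (List.range (q.length + 1)).map (pvVal (q ++ [x]))
      = (List.range (q.length + 1)).map (pvVal q) := by
    apply List.map_congr_left
    intro m hm
    exact pvVal_append q [x] m (by simp at hm; omega)
  rw [hmaps]
  simp

theorem pvVal_last_le (q : List Char) : pvVal q q.length ≤ pvMaxCK q := by
  exact (PySem.List.le_foldl_max _ _).2 _
    (List.mem_map_of_mem (by simp))

theorem pvMaxCK_snoc_absorb (q : List Char) (x : Char)
    (h : pvVal (q ++ [x]) (q.length + 1) ≤ pvVal q q.length) : pvMaxCK (q ++ [x]) = pvMaxCK q := by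
  rw [pvMaxCK_snoc]
  exact max_eq_left (le_trans h (pvVal_last_le q))


theorem pvOk_snoc (q : List Char) (x : Char) (hok : pvOk q)
    (h : pvOkAt (q ++ [x]) (q.length + 1)) : pvOk (q ++ [x]) := by
  intro m hm
  rcases Nat.lt_or_ge m (q.length + 1) with hlt | hge
  · exact (pvOkAt_append q [x] m (by omega)).mpr (hok m (by omega))
  · have hme : m = q.length + 1 := by simp at hm; omega
    exact hme ▸ h

theorem pvOkAt_top (q : List Char) (x : Char) :
    pvOkAt (q ++ [x]) (q.length + 1) ↔
      ((q ++ [x]).count 'r' ≤ (q ++ [x]).count 'c' ∧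
       (q ++ [x]).count 'o' ≤ (q ++ [x]).count 'r' ∧
       (q ++ [x]).count 'a' ≤ (q ++ [x]).count 'o' ∧
       (q ++ [x]).count 'k' ≤ (q ++ [x]).count 'a') := by
  have h : q.length + 1 = (q ++ [x]).length := by simp
  rw [h]
  unfold pvOkAt
  simp only [pvCnt_length]

theorem pvVal_top (q : List Char) (x : Char) :
    pvVal (q ++ [x]) (q.length + 1)
      = ((q ++ [x]).count 'c' : Int) - ((q ++ [x]).count 'k' : Int) := by
  have h : q.length + 1 = (q ++ [x]).length := by simp
  rw [h]
  unfold pvVal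
  simp only [pvCnt_length]

theorem pvVal_len (q : List Char) : pvVal q q.length = (q.count 'c' : Int) - (q.count 'k' : Int) := by
  simp [pvVal, pvCnt_length]

theorem pvOk_counts (q : List Char) (hok : pvOk q) :
    q.count 'r' ≤ q.count 'c' ∧ q.count 'o' ≤ q.count 'r' ∧
    q.count 'a' ≤ q.count 'o' ∧ q.count 'k' ≤ q.count 'a' := by
  have h := hok q.length le_rfl
  simpa [pvOkAt, pvCnt_length] using h

theorem pvOkAt_mid (l : List Char) (q : List Char) (ch : Char) (t' : List Char)
    (h : l = q ++ ch :: t') (hok : pvOk l) : pvOkAt (q ++ [ch]) (q.length + 1) := by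
  have hlen : l.length = q.length + 1 + t'.length := by simp [h]; omega
  have h1 : pvOkAt l (q.length + 1) := hok _ (by omega)
  have h2 : ∀ c', pvCnt (q ++ ch :: t') c' (q.length + 1) = pvCnt (q ++ [ch]) c' (q.length + 1) := by
    intro c'
    rw [pvCnt_snoc_top]
    have : q.length + 1 = (q ++ [ch]).length := by simp
    rw [this, pvCnt_length]
  rw [h] at h1
  simp only [pvOkAt, h2] at h1
  exact h1

theorem pvIfMax (a x : Int) : (if x > a then x else a) = max a x := by
  rcases le_total x a with h | h <;> simp [h] <;> omega

theorem pvB_char (t q : List Char) (hok : pvOk q) :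
    (pvOk (q ++ t) ∧ pvBal (q ++ t) →
      pvB_loop t (q.count 'c') (q.count 'r') (q.count 'o') (q.count 'a') (q.count 'k')
        ((q.count 'c' : Int) - (q.count 'k' : Int)) (pvMaxCK q) = pvMaxCK (q ++ t))
    ∧ (¬ (pvOk (q ++ t) ∧ pvBal (q ++ t)) →
      pvB_loop t (q.count 'c') (q.count 'r') (q.count 'o') (q.count 'a') (q.count 'k')
        ((q.count 'c' : Int) - (q.count 'k' : Int)) (pvMaxCK q) = -1) := by
  induction t generalizing q with
  | nil =>
    constructor
    · rintro ⟨-, hbal⟩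
      rcases hbal with ⟨h1, h2, h3, h4⟩
      simp only [List.append_nil] at *
      simp [pvB_loop]
      intro h
      exfalso
      apply h <;> omega
    · intro hnot
      simp only [List.append_nil] at *
      simp [pvB_loop]
      intro h1 h2 h3 h4
      exfalso
      exact hnot ⟨hok, by unfold pvBal; omega⟩
  | cons ch t' ih =>
    have hqq : q ++ ch :: t' = (q ++ [ch]) ++ t' := by simp
    by_cases hc : ch = 'c'
    · subst hc
      have hC : (q ++ ['c']).count 'c' = q.count 'c' + 1 := by rw [pvCount_snoc]; simp
      have hR : (q ++ ['c']).count 'r' = q.count 'r' := by rw [pvCount_snoc]; simp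
      have hO : (q ++ ['c']).count 'o' = q.count 'o' := by rw [pvCount_snoc]; simp
      have hA : (q ++ ['c']).count 'a' = q.count 'a' := by rw [pvCount_snoc]; simp
      have hK : (q ++ ['c']).count 'k' = q.count 'k' := by rw [pvCount_snoc]; simp
      have hok' : pvOk (q ++ ['c']) := by
        apply pvOk_snoc q 'c' hok
        rw [pvOkAt_top, hC, hR, hO, hA, hK]
        have := pvOk_counts q hok
        omega
      have hMax : pvMaxCK (q ++ ['c']) = max (pvMaxCK q) ((q.count 'c' : Int) - q.count 'k' + 1) := by
        rw [pvMaxCK_snoc, pvVal_top, hC, hK]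
        push_cast
        ring_nf
      have H := ih (q ++ ['c']) hok'
      rw [hC, hR, hO, hA, hK, hMax, ← hqq] at H
      push_cast at H ⊢
      simp only [pvB_loop, if_pos rfl]
      rw [pvIfMax]
      have hact : (q.count 'c' : Int) + 1 - q.count 'k' = (q.count 'c' : Int) - q.count 'k' + 1 := by
        ring
      rw [hact] at H
      exact H
    · by_cases hr : ch = 'r'
      · subst hr
        have hC : (q ++ ['r']).count 'c' = q.count 'c' + 0 := by rw [pvCount_snoc]; simp
        have hR : (q ++ ['r']).count 'r' = q.count 'r' + 1 := by rw [pvCount_snoc]; simp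
        have hO : (q ++ ['r']).count 'o' = q.count 'o' + 0 := by rw [pvCount_snoc]; simp
        have hA : (q ++ ['r']).count 'a' = q.count 'a' + 0 := by rw [pvCount_snoc]; simp
        have hK : (q ++ ['r']).count 'k' = q.count 'k' + 0 := by rw [pvCount_snoc]; simp
        by_cases hguard : (q.count 'r' : Int) + 1 > q.count 'c'
        · constructor
          · rintro ⟨hokL, -⟩
            exfalso
            have hm := pvOkAt_mid _ q 'r' t' rfl hokL
            rw [pvOkAt_top, hC, hR, hO, hA, hK] at hm
            omega
          · intro _
            simp [pvB_loop, hguard]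
        · have hokAt : pvOkAt (q ++ ['r']) (q.length + 1) := by
            rw [pvOkAt_top, hC, hR, hO, hA, hK]
            have := pvOk_counts q hok
            omega
          have hok' := pvOk_snoc q 'r' hok hokAt
          have hMax : pvMaxCK (q ++ ['r']) = pvMaxCK q := by
            apply pvMaxCK_snoc_absorb
            rw [pvVal_top, pvVal_len, hC, hK]
            push_cast
            omega
          have H := ih (q ++ ['r']) hok'
          rw [hC, hR, hO, hA, hK, hMax, ← hqq] at H
          push_cast at H ⊢
          simp only [add_zero] at H
          simp only [pvB_loop, if_neg (by decide : ¬('r' = 'c')), if_pos rfl, if_neg hguard]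
          exact H
      · by_cases ho : ch = 'o'
        · subst ho
          have hC : (q ++ ['o']).count 'c' = q.count 'c' + 0 := by rw [pvCount_snoc]; simp
          have hR : (q ++ ['o']).count 'r' = q.count 'r' + 0 := by rw [pvCount_snoc]; simp
          have hO : (q ++ ['o']).count 'o' = q.count 'o' + 1 := by rw [pvCount_snoc]; simp
          have hA : (q ++ ['o']).count 'a' = q.count 'a' + 0 := by rw [pvCount_snoc]; simp
          have hK : (q ++ ['o']).count 'k' = q.count 'k' + 0 := by rw [pvCount_snoc]; simp
          by_cases hguard : (q.count 'o' : Int) + 1 > q.count 'r'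
          · constructor
            · rintro ⟨hokL, -⟩
              exfalso
              have hm := pvOkAt_mid _ q 'o' t' rfl hokL
              rw [pvOkAt_top, hC, hR, hO, hA, hK] at hm
              omega
            · intro _
              simp [pvB_loop, hguard]
          · have hokAt : pvOkAt (q ++ ['o']) (q.length + 1) := by
              rw [pvOkAt_top, hC, hR, hO, hA, hK]
              have := pvOk_counts q hok
              omega
            have hok' := pvOk_snoc q 'o' hok hokAt
            have hMax : pvMaxCK (q ++ ['o']) = pvMaxCK q := by
              apply pvMaxCK_snoc_absorb
              rw [pvVal_top, pvVal_len, hC, hK]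
              push_cast
              omega
            have H := ih (q ++ ['o']) hok'
            rw [hC, hR, hO, hA, hK, hMax, ← hqq] at H
            push_cast at H ⊢
            simp only [add_zero] at H
            simp only [pvB_loop, if_neg (by decide : ¬('o' = 'c')), if_neg (by decide : ¬('o' = 'r')), if_pos rfl, if_neg hguard]
            exact H
        · by_cases ha : ch = 'a'
          · subst ha
            have hC : (q ++ ['a']).count 'c' = q.count 'c' + 0 := by rw [pvCount_snoc]; simp
            have hR : (q ++ ['a']).count 'r' = q.count 'r' + 0 := by rw [pvCount_snoc]; simp
            have hO : (q ++ ['a']).count 'o' = q.count 'o' + 0 := by rw [pvCount_snoc]; simp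
            have hA : (q ++ ['a']).count 'a' = q.count 'a' + 1 := by rw [pvCount_snoc]; simp
            have hK : (q ++ ['a']).count 'k' = q.count 'k' + 0 := by rw [pvCount_snoc]; simp
            by_cases hguard : (q.count 'a' : Int) + 1 > q.count 'o'
            · constructor
              · rintro ⟨hokL, -⟩
                exfalso
                have hm := pvOkAt_mid _ q 'a' t' rfl hokL
                rw [pvOkAt_top, hC, hR, hO, hA, hK] at hm
                omega
              · intro _
                simp [pvB_loop, hguard]
            · have hokAt : pvOkAt (q ++ ['a']) (q.length + 1) := by
                rw [pvOkAt_top, hC, hR, hO, hA, hK]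
                have := pvOk_counts q hok
                omega
              have hok' := pvOk_snoc q 'a' hok hokAt
              have hMax : pvMaxCK (q ++ ['a']) = pvMaxCK q := by
                apply pvMaxCK_snoc_absorb
                rw [pvVal_top, pvVal_len, hC, hK]
                push_cast
                omega
              have H := ih (q ++ ['a']) hok'
              rw [hC, hR, hO, hA, hK, hMax, ← hqq] at H
              push_cast at H ⊢
              simp only [add_zero] at H
              simp only [pvB_loop, if_neg (by decide : ¬('a' = 'c')), if_neg (by decide : ¬('a' = 'r')), if_neg (by decide : ¬('a' = 'o')), if_pos rfl, if_neg hguard]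
              exact H
          · by_cases hk : ch = 'k'
            · subst hk
              have hC : (q ++ ['k']).count 'c' = q.count 'c' + 0 := by rw [pvCount_snoc]; simp
              have hR : (q ++ ['k']).count 'r' = q.count 'r' + 0 := by rw [pvCount_snoc]; simp
              have hO : (q ++ ['k']).count 'o' = q.count 'o' + 0 := by rw [pvCount_snoc]; simp
              have hA : (q ++ ['k']).count 'a' = q.count 'a' + 0 := by rw [pvCount_snoc]; simp
              have hK : (q ++ ['k']).count 'k' = q.count 'k' + 1 := by rw [pvCount_snoc]; simp
              by_cases hguard : (q.count 'k' : Int) + 1 > q.count 'a'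
              · constructor
                · rintro ⟨hokL, -⟩
                  exfalso
                  have hm := pvOkAt_mid _ q 'k' t' rfl hokL
                  rw [pvOkAt_top, hC, hR, hO, hA, hK] at hm
                  omega
                · intro _
                  simp [pvB_loop, hguard]
              · have hokAt : pvOkAt (q ++ ['k']) (q.length + 1) := by
                  rw [pvOkAt_top, hC, hR, hO, hA, hK]
                  have := pvOk_counts q hok
                  omega
                have hok' := pvOk_snoc q 'k' hok hokAt
                have hMax : pvMaxCK (q ++ ['k']) = pvMaxCK q := by
                  apply pvMaxCK_snoc_absorb
                  rw [pvVal_top, pvVal_len, hC, hK]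
                  push_cast
                  omega
                have H := ih (q ++ ['k']) hok'
                rw [hC, hR, hO, hA, hK, hMax, ← hqq] at H
                push_cast at H ⊢
                simp only [add_zero] at H
                simp only [pvB_loop, if_neg (by decide : ¬('k' = 'c')), if_neg (by decide : ¬('k' = 'r')), if_neg (by decide : ¬('k' = 'o')), if_neg (by decide : ¬('k' = 'a')), if_pos rfl, if_neg hguard]
                have hact : (q.count 'c' : Int) - (q.count 'k' + 1) = (q.count 'c' : Int) - q.count 'k' - 1 := by
                  ring
                rw [hact] at H
                exact H
            · have hC : (q ++ [ch]).count 'c' = q.count 'c' := by rw [pvCount_snoc]; simp [hc]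
              have hR : (q ++ [ch]).count 'r' = q.count 'r' := by rw [pvCount_snoc]; simp [hr]
              have hO : (q ++ [ch]).count 'o' = q.count 'o' := by rw [pvCount_snoc]; simp [ho]
              have hA : (q ++ [ch]).count 'a' = q.count 'a' := by rw [pvCount_snoc]; simp [ha]
              have hK : (q ++ [ch]).count 'k' = q.count 'k' := by rw [pvCount_snoc]; simp [hk]
              have hokAt : pvOkAt (q ++ [ch]) (q.length + 1) := by
                rw [pvOkAt_top, hC, hR, hO, hA, hK]
                exact pvOk_counts q hok
              have hok' := pvOk_snoc q ch hok hokAt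
              have hMax : pvMaxCK (q ++ [ch]) = pvMaxCK q := by
                apply pvMaxCK_snoc_absorb
                rw [pvVal_top, pvVal_len, hC, hK]
              have H := ih (q ++ [ch]) hok'
              rw [hC, hR, hO, hA, hK, hMax, ← hqq] at H
              simp only [pvB_loop, if_neg hc, if_neg hr, if_neg ho, if_neg ha, if_neg hk]
              exact H


theorem pvForall₂_countP {xs ys : List Nat} (h : List.Forall₂ (· < ·) xs ys) (m : Nat) :
    ys.countP (fun x => decide (x < m)) ≤ xs.countP (fun x => decide (x < m)) := by
  induction h with
  | nil => simp
  | cons hxy hrest ih =>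
    rename_i x y xs' ys'
    simp only [List.countP_cons]
    rcases Nat.lt_or_ge y m with h1 | h1
    · have hx : x < m := by omega
      simp [h1, hx]
      omega
    · have h2 : ¬ (y < m) := by omega
      by_cases hx : x < m <;> simp [h2, hx] <;> omega

theorem pvCountP_le_forall₂ (xs ys : List Nat) (hxs : xs.Pairwise (· < ·))
    (hys : ys.Pairwise (· < ·)) (hlen : xs.length = ys.length)
    (hdisj : ∀ x ∈ xs, x ∉ ys)
    (H : ∀ m, ys.countP (fun x => decide (x < m)) ≤ xs.countP (fun x => decide (x < m))) :
    List.Forall₂ (· < ·) xs ys := by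
  induction xs generalizing ys with
  | nil =>
    cases ys with
    | nil => exact List.Forall₂.nil
    | cons y ys' => simp at hlen
  | cons x xs' ih =>
    cases ys with
    | nil => simp at hlen
    | cons y ys' =>
      have hxny : x ≠ y := fun he => hdisj x List.mem_cons_self (he ▸ List.mem_cons_self)
      have hxtail : ∀ z ∈ xs', x < z := (List.pairwise_cons.mp hxs).1
      have hytail : ∀ z ∈ ys', y < z := (List.pairwise_cons.mp hys).1
      have hxy : x < y := by
        by_contra hge
        have hyx : y < x := by omega
        have hm := H (y + 1)
        have h1 : (y :: ys').countP (fun z => decide (z < y + 1)) ≥ 1 := by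
          simp [List.countP_cons]
        have h2 : (x :: xs').countP (fun z => decide (z < y + 1)) = 0 := by
          rw [List.countP_eq_zero]
          intro z hz
          have hyz : y < z := by
            rcases List.mem_cons.mp hz with rfl | hz'
            · omega
            · exact lt_trans hyx (hxtail z hz')
          simp
          omega
        omega
      refine List.Forall₂.cons hxy (ih ys' hxs.of_cons hys.of_cons (by simpa using hlen)
        (fun z hz => fun hzy => hdisj z (List.mem_cons_of_mem _ hz) (List.mem_cons_of_mem _ hzy)) ?_)
      intro m
      rcases Nat.lt_or_ge y m with hym | hym
      · have hm := H m
        have hxm : x < m := by omega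
        simp only [List.countP_cons] at hm
        simp [hym, hxm] at hm
        omega
      · have : ys'.countP (fun z => decide (z < m)) = 0 := by
          rw [List.countP_eq_zero]
          intro z hz
          have := hytail z hz
          simp
          omega
        omega



theorem pvDropFree_eq (ks : List Int) (current cur : Int) (h : ks.Pairwise (· ≤ ·)) :
    pvA_dropFree ks current cur =
      (ks.filter (fun kk => !decide (kk < current)),
       cur - ks.countP (fun kk => decide (kk < current))) := by
  induction ks generalizing cur with
  | nil => simp [pvA_dropFree]
  | cons k ks' ih =>
    have htail : ∀ z ∈ ks', k ≤ z := (List.pairwise_cons.mp h).1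
    by_cases hk : k < current
    · rw [pvA_dropFree, if_pos hk, ih (cur - 1) h.of_cons]
      simp [List.filter_cons, List.countP_cons, hk, Prod.ext_iff]
      omega
    · rw [pvA_dropFree, if_neg hk]
      have hfilter : (k :: ks').filter (fun kk => !decide (kk < current)) = k :: ks' := by
        rw [List.filter_eq_self]
        intro z hz
        have : ¬ z < current := by
          rcases List.mem_cons.mp hz with rfl | hz'
          · exact hk
          · have := htail z hz'; omega
        simp [this]
      have hcount : (k :: ks').countP (fun kk => decide (kk < current)) = 0 := by
        rw [List.countP_eq_zero]
        intro z hz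
        have : ¬ z < current := by
          rcases List.mem_cons.mp hz with rfl | hz'
          · exact hk
          · have := htail z hz'; omega
        simp [this]
      rw [hfilter, hcount]
      simp

theorem pvSweep_eq (cc kk : List Nat) (hcc : cc.Pairwise (· < ·)) (hkk : kk.Pairwise (· < ·))
    (hdisj : ∀ x ∈ cc, x ∉ kk) :
    ∀ (cs : List Nat) (p : Nat) (maxn cur : Int),
      cs = cc.filter (fun x => decide (p ≤ x)) →
      cur = (cc.countP (fun x => decide (x < p)) : Int) - (kk.countP (fun x => decide (x < p)) : Int) →
      cur ≤ maxn →
      pvA_sweep (cs.map Int.ofNat) ((kk.filter (fun x => decide (p ≤ x))).map Int.ofNat) maxn cur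
        = List.foldl max maxn (cs.map (fun x =>
            (cc.countP (fun y => decide (y < x + 1)) : Int)
              - (kk.countP (fun y => decide (y < x + 1)) : Int))) := by
  intro cs
  induction cs with
  | nil =>
    intro p maxn cur hcs hcur hle
    simpa [pvA_sweep] using max_eq_left hle
  | cons x cs' ih =>
    intro p maxn cur hcs hcur hle
    have hxf : x ∈ cc.filter (fun y => decide (p ≤ y)) := hcs ▸ List.mem_cons_self
    obtain ⟨hxcc, hpxd⟩ := List.mem_filter.mp hxf
    have hpx : p ≤ x := by simpa using hpxd
    have hsort : (x :: cs').Pairwise (· < ·) := hcs ▸ hcc.filter _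
    have htail : ∀ z ∈ cs', x < z := (List.pairwise_cons.mp hsort).1
    have hxnk : x ∉ kk := hdisj x hxcc
    have hcs' : cs' = cc.filter (fun y => decide (x + 1 ≤ y)) := by
      have h1 : cc.filter (fun y => decide (x + 1 ≤ y))
          = (cc.filter (fun y => decide (p ≤ y))).filter (fun y => decide (x + 1 ≤ y)) := by
        rw [List.filter_filter]
        apply List.filter_congr
        intro y _
        by_cases hy : x + 1 ≤ y
        · have : p ≤ y := by omega
          simp [hy, this]
        · simp [hy]
      rw [h1, ← hcs, List.filter_cons]
      have hxx : ¬ (x + 1 ≤ x) := by omega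
      simp only [hxx, decide_false, Bool.false_eq_true, if_false]
      refine (List.filter_eq_self.mpr ?_).symm
      intro z hz
      simpa using htail z hz
    have hks_sort : ((kk.filter (fun y => decide (p ≤ y))).map Int.ofNat).Pairwise (· ≤ ·) :=
      (hkk.filter _).map Int.ofNat (fun hab => by
        simp only [Int.ofNat_eq_natCast, Nat.cast_le]
        omega)
    have hdrop := pvDropFree_eq ((kk.filter (fun y => decide (p ≤ y))).map Int.ofNat)
      (Int.ofNat x) cur hks_sort
    have hkfil : ((kk.filter (fun y => decide (p ≤ y))).map Int.ofNat).filter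
          (fun kkv => !decide (kkv < Int.ofNat x))
        = (kk.filter (fun y => decide (x + 1 ≤ y))).map Int.ofNat := by
      rw [List.filter_map]
      congr 1
      rw [List.filter_filter]
      apply List.filter_congr
      intro y hy
      have hyx : y ≠ x := fun he => hxnk (he ▸ hy)
      by_cases h1 : x + 1 ≤ y
      · have h3 : p ≤ y := by omega
        simp only [Function.comp_apply]
        have h2 : ¬ (Int.ofNat y < Int.ofNat x) := by
          simp only [Int.ofNat_eq_natCast, Nat.cast_lt]
          omega
        simp [h1, h2, h3]
        omega
      · simp only [Function.comp_apply]
        have h2 : Int.ofNat y < Int.ofNat x := by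
          simp only [Int.ofNat_eq_natCast, Nat.cast_lt]
          omega
        simp [h1, h2]
        omega
    have hkc1 : ((kk.filter (fun y => decide (p ≤ y))).map Int.ofNat).countP
          (fun kkv => decide (kkv < Int.ofNat x))
        = kk.countP (fun y => decide (y < x + 1)) - kk.countP (fun y => decide (y < p)) := by
      rw [List.countP_map]
      have s1 : (kk.filter (fun y => decide (p ≤ y))).countP
            ((fun kkv => decide (kkv < Int.ofNat x)) ∘ Int.ofNat)
          = (kk.filter (fun y => decide (p ≤ y))).countP (fun y => decide (y < x + 1)) := by
        apply List.countP_congr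
        intro y hy
        have hyk : y ∈ kk := (List.mem_filter.mp hy).1
        have hyx : y ≠ x := fun he => hxnk (he ▸ hyk)
        simp only [Function.comp_apply, Int.ofNat_eq_natCast, Nat.cast_lt, decide_eq_true_eq]
        omega
      rw [s1, List.countP_filter]
      have hsplit := pvCountP_split kk (fun y => decide (y < x + 1)) (fun y => decide (p ≤ y))
      have he2 : kk.countP (fun y => decide (y < x + 1) && !decide (p ≤ y))
          = kk.countP (fun y => decide (y < p)) := by
        apply List.countP_congr
        intro y _
        by_cases h1 : y < p
        · have : y < x + 1 := by omega
          simp [this, h1]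
        · simp [h1]
      omega
    have hccount : cc.countP (fun y => decide (y < x + 1))
        = cc.countP (fun y => decide (y < p)) + 1 := by
      have hsplit := pvCountP_split cc (fun y => decide (y < x + 1)) (fun y => decide (p ≤ y))
      have he1 : cc.countP (fun y => decide (y < x + 1) && decide (p ≤ y))
          = (cc.filter (fun y => decide (p ≤ y))).countP (fun y => decide (y < x + 1)) := by
        rw [List.countP_filter]
      have he2 : cc.countP (fun y => decide (y < x + 1) && !decide (p ≤ y))
          = cc.countP (fun y => decide (y < p)) := by
        apply List.countP_congr
        intro y _
        by_cases h1 : y < p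
        · have : y < x + 1 := by omega
          simp [this, h1]
        · simp [h1]
      have h0 : cs'.countP (fun y => decide (y < x + 1)) = 0 :=
        List.countP_eq_zero.mpr (fun z hz => by simpa using htail z hz)
      have he3 : (cc.filter (fun y => decide (p ≤ y))).countP (fun y => decide (y < x + 1)) = 1 := by
        rw [← hcs, List.countP_cons, h0]
        simp
      omega
    have hkllep : (kk.countP (fun y => decide (y < p))) ≤ kk.countP (fun y => decide (y < x + 1)) := by
      have := pvCountP_split kk (fun y => decide (y < x + 1)) (fun y => decide (p ≤ y))
      have he2 : kk.countP (fun y => decide (y < x + 1) && !decide (p ≤ y))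
          = kk.countP (fun y => decide (y < p)) := by
        apply List.countP_congr
        intro y _
        by_cases h1 : y < p
        · have : y < x + 1 := by omega
          simp [this, h1]
        · simp [h1]
      omega
    have hstep : pvA_sweep ((x :: cs').map Int.ofNat)
          ((kk.filter (fun y => decide (p ≤ y))).map Int.ofNat) maxn cur
        = pvA_sweep (cs'.map Int.ofNat) ((kk.filter (fun y => decide (x + 1 ≤ y))).map Int.ofNat)
            (max maxn ((cur - ((kk.filter (fun y => decide (p ≤ y))).map Int.ofNat).countP
              (fun kkv => decide (kkv < Int.ofNat x)) + 1)))
            (cur - ((kk.filter (fun y => decide (p ≤ y))).map Int.ofNat).countP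
              (fun kkv => decide (kkv < Int.ofNat x)) + 1) := by
      rw [List.map_cons]
      rw [pvA_sweep, hdrop, hkfil]
    rw [hstep]
    have hcur1 : cur - ((kk.filter (fun y => decide (p ≤ y))).map Int.ofNat).countP
          (fun kkv => decide (kkv < Int.ofNat x)) + 1
        = (cc.countP (fun y => decide (y < x + 1)) : Int)
          - (kk.countP (fun y => decide (y < x + 1)) : Int) := by
      rw [hkc1, hcur, hccount]
      push_cast [hkllep]
      ring
    rw [hcur1, ih (x + 1) _ _ hcs' rfl (le_max_right _ _), List.map_cons, List.foldl_cons]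


theorem pvEnumSwap (ch : Char) (l : List Char) : ∀ s : Int,
    (((PySem.List.enumerate l s).map Prod.swap).filter (fun p => p.1 == ch)).map (fun x => x.2)
      = (pvOcc ch l).map (fun n => Int.ofNat n + s) := by
  induction l with
  | nil => intro s; simp [PySem.List.enumerate_nil, pvOcc]
  | cons a t ih =>
    intro s
    rw [PySem.List.enumerate_cons]
    have hmm : ((pvOcc ch t).map (· + 1)).map (fun n => Int.ofNat n + s)
        = (pvOcc ch t).map (fun n => Int.ofNat n + (s + 1)) := by
      rw [List.map_map]
      apply List.map_congr_left
      intro n _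
      simp only [Function.comp_apply, Int.ofNat_eq_natCast]
      push_cast
      ring
    by_cases h : a = ch
    · subst h
      simp only [pvOcc, if_pos rfl, List.map_cons, List.filter_cons]
      simp only [Prod.swap_prod_mk, BEq.refl, if_pos]
      rw [List.map_cons, ih (s + 1)]
      simp only [List.map_cons, hmm]
      simp
    · have hbeq : (a == ch) = false := by simp [h]
      simp only [pvOcc, if_neg h, List.map_cons, List.filter_cons]
      simp only [Prod.swap_prod_mk, hbeq, Bool.false_eq_true, if_false]
      rw [ih (s + 1), hmm]

theorem pvPositions_getD (l : List Char) (ch : Char) :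
    (pvA_positions l).getD ch [] = (pvOcc ch l).map Int.ofNat := by
  unfold pvA_positions
  have hfold : ((PySem.List.enumerate l 0).map Prod.swap).foldl
        (fun d p => d.modify p.1 [] (· ++ [p.2])) PySem.Dict.empty
      = (PySem.List.enumerate l 0).foldl (fun d p => d.modify p.2 [] (· ++ [p.1]))
        PySem.Dict.empty := by
    rw [List.foldl_map]
    simp [Prod.fst_swap, Prod.snd_swap]
  rw [← hfold, PySem.Dict.getD_foldl_modify_append]
  rw [show (PySem.Dict.empty : PySem.Dict Char (List Int)).getD ch [] = [] from rfl]
  rw [List.nil_append, pvEnumSwap ch l 0]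
  apply List.map_congr_left
  intro n _
  simp

theorem pvOcc_disjoint (l : List Char) (ch ch' : Char) (hne : ch ≠ ch') :
    ∀ x ∈ pvOcc ch l, x ∉ pvOcc ch' l := by
  intro x hx hx'
  rw [pvOcc_mem] at hx hx'
  rw [hx] at hx'
  exact hne (Option.some.inj hx')

theorem pvOcc_lt_length (l : List Char) (ch : Char) : ∀ x ∈ pvOcc ch l, x < l.length := by
  intro x hx
  rw [pvOcc_mem] at hx
  exact (List.getElem?_eq_some_iff.mp hx).1

-- prefix-count inequalities, all m (beyond the length they follow from balance)
theorem pvOk_cnt (l : List Char) (hok : pvOk l) (hbal : pvBal l) (m : Nat) : pvOkAt l m := by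
  rcases Nat.le_total m l.length with h | h
  · exact hok m h
  · have h4 := pvCnt_ge_length l
    rcases hbal with ⟨h1, h2, h3, h5⟩
    unfold pvOkAt
    rw [h4 'r' m (by omega), h4 'c' m (by omega), h4 'o' m (by omega),
        h4 'a' m (by omega), h4 'k' m (by omega)]
    omega

-- the per-index order conditions are exactly prefix validity
theorem pvChain_iff (l : List Char) (hbal : pvBal l) :
    (List.Forall₂ (· < ·) (pvOcc 'c' l) (pvOcc 'r' l) ∧
     List.Forall₂ (· < ·) (pvOcc 'r' l) (pvOcc 'o' l) ∧
     List.Forall₂ (· < ·) (pvOcc 'o' l) (pvOcc 'a' l) ∧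
     List.Forall₂ (· < ·) (pvOcc 'a' l) (pvOcc 'k' l)) ↔ pvOk l := by
  constructor
  · rintro ⟨f1, f2, f3, f4⟩ m _
    refine ⟨?_, ?_, ?_, ?_⟩ <;> unfold pvCnt
    · rw [← pvOcc_countP, ← pvOcc_countP]; exact pvForall₂_countP f1 m
    · rw [← pvOcc_countP, ← pvOcc_countP]; exact pvForall₂_countP f2 m
    · rw [← pvOcc_countP, ← pvOcc_countP]; exact pvForall₂_countP f3 m
    · rw [← pvOcc_countP, ← pvOcc_countP]; exact pvForall₂_countP f4 m
  · intro hok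
    rcases hbal with ⟨h1, h2, h3, h5⟩
    refine ⟨?_, ?_, ?_, ?_⟩ <;>
      apply pvCountP_le_forall₂ _ _ (pvOcc_sorted _ _) (pvOcc_sorted _ _)
        (by rw [pvOcc_length, pvOcc_length]; omega)
        (pvOcc_disjoint l _ _ (by decide)) <;>
      intro m <;> rw [pvOcc_countP, pvOcc_countP] <;>
      have h := pvOk_cnt l hok ⟨h1, h2, h3, h5⟩ m <;> unfold pvOkAt pvCnt at h <;> omega

-- every 'k' comes after the first 'c' (validity forbids an early 'k')
theorem pvK_after_c0 (l : List Char) (hok : pvOk l) (hbal : pvBal l)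
    (c0 : Nat) (ct : List Nat) (hocc : pvOcc 'c' l = c0 :: ct) :
    ∀ y ∈ pvOcc 'k' l, c0 < y := by
  intro y hy
  by_contra hge
  have hyc0 : y ≠ c0 := by
    intro he
    exact pvOcc_disjoint l 'k' 'c' (by decide) y hy (he ▸ (hocc ▸ List.mem_cons_self))
  have hylt : y < c0 := by omega
  have hK1 : 1 ≤ (l.take (y + 1)).count 'k' := by
    rw [← pvOcc_countP]
    exact List.countP_pos_iff.mpr ⟨y, hy, by simp⟩
  have hC0 : (l.take (y + 1)).count 'c' = 0 := by
    rw [← pvOcc_countP, List.countP_eq_zero]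
    intro z hz
    rw [hocc] at hz
    have hc0z : c0 ≤ z := by
      rcases List.mem_cons.mp hz with rfl | hz'
      · omega
      · have := (List.pairwise_cons.mp (hocc ▸ pvOcc_sorted 'c' l)).1 z hz'
        omega
    simp
    omega
  have h := pvOk_cnt l hok hbal (y + 1)
  unfold pvOkAt pvCnt at h
  omega

-- the sweep's value list folds to the overall maximum
theorem pvFold_eq (l : List Char) (hok : pvOk l) (hbal : pvBal l)
    (c0 : Nat) (ct : List Nat) (hocc : pvOcc 'c' l = c0 :: ct) :
    List.foldl max 1 (ct.map (fun x => pvVal l (x + 1))) = pvMaxCK l := by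
  have hkall := pvK_after_c0 l hok hbal c0 ct hocc
  have hcttail : ∀ z ∈ ct, c0 < z := (List.pairwise_cons.mp (hocc ▸ pvOcc_sorted 'c' l)).1
  have hval1 : pvVal l (c0 + 1) = 1 := by
    have hc : (l.take (c0 + 1)).count 'c' = 1 := by
      rw [← pvOcc_countP, hocc, List.countP_cons]
      simp
      intro z hz
      exact hcttail z hz
    have hk : (l.take (c0 + 1)).count 'k' = 0 := by
      rw [← pvOcc_countP, List.countP_eq_zero]
      intro z hz
      have := hkall z hz
      simp
      omega
    unfold pvVal pvCnt
    rw [hc, hk]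
    simp
  have hc0len : c0 < l.length := pvOcc_lt_length l 'c' c0 (hocc ▸ List.mem_cons_self)
  have hS1 : (1 : Int) ≤ List.foldl max 1 (ct.map (fun x => pvVal l (x + 1))) :=
    (PySem.List.le_foldl_max _ _).1
  have hub : ∀ m, pvVal l m ≤ List.foldl max 1 (ct.map (fun x => pvVal l (x + 1))) := by
    intro m
    induction m with
    | zero =>
      have : pvVal l 0 = 0 := by simp [pvVal, pvCnt]
      rw [this]
      omega
    | succ m ihm =>
      rcases Nat.lt_or_ge m l.length with hm | hm
      · by_cases hcm : l[m]? = some 'c'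
        · have hmem : m ∈ pvOcc 'c' l := (pvOcc_mem 'c' l m).mpr hcm
          rw [hocc] at hmem
          rcases List.mem_cons.mp hmem with rfl | hmem'
          · rw [hval1]; exact hS1
          · exact (PySem.List.le_foldl_max _ _).2 _ (List.mem_map_of_mem hmem')
        · have hstep : pvVal l (m + 1) ≤ pvVal l m := by
            unfold pvVal pvCnt
            rw [List.take_add_one]
            rcases hlm : l[m]? with - | cm
            · simp
            · have hcne : cm ≠ 'c' := by
                intro he
                exact hcm (by rw [hlm, he])
              rw [List.count_append, List.count_append]
              have h1 : [cm].count 'c' = 0 := by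
                simp [hcne]
              simp [h1]
              omega
          exact le_trans hstep ihm
      · have hstep : pvVal l (m + 1) = pvVal l m := by
          unfold pvVal
          rw [pvCnt_ge_length l _ _ (by omega), pvCnt_ge_length l _ _ (by omega),
              pvCnt_ge_length l _ _ (by omega), pvCnt_ge_length l _ _ (by omega)]
        rw [hstep]
        exact ihm
  apply le_antisymm
  · apply pvFoldlMax_le
    · rw [← hval1]
      exact (PySem.List.le_foldl_max _ _).2 _
        (List.mem_map_of_mem (by simp; omega))
    · intro v hv
      obtain ⟨x, hx, rfl⟩ := List.mem_map.mp hv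
      have hxlen : x < l.length := pvOcc_lt_length l 'c' x (hocc ▸ List.mem_cons_of_mem _ hx)
      exact (PySem.List.le_foldl_max _ _).2 _
        (List.mem_map_of_mem (by simp; omega))
  · apply pvFoldlMax_le
    · omega
    · intro v hv
      obtain ⟨m, _, rfl⟩ := List.mem_map.mp hv
      exact hub m

theorem pvB_spec (l : List Char) :
    (pvOk l ∧ pvBal l → pvB_loop l 0 0 0 0 0 0 0 = pvMaxCK l) ∧
    (¬ (pvOk l ∧ pvBal l) → pvB_loop l 0 0 0 0 0 0 0 = -1) := by
  have hok0 : pvOk ([] : List Char) := by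
    intro m hm
    simp only [List.length_nil, Nat.le_zero] at hm
    subst hm
    simp [pvOkAt, pvCnt]
  have h := pvB_char l [] hok0
  simpa [pvMaxCK_nil] using h

theorem pvGetD_lt (xs ys : List Nat) (i : Nat) (hx : i < xs.length) (hy : i < ys.length) :
    ((xs.map Int.ofNat).getD i 0 < (ys.map Int.ofNat).getD i 0) ↔ xs[i] < ys[i] := by
  rw [List.getD_eq_getElem _ _ (by simpa using hx), List.getD_eq_getElem _ _ (by simpa using hy)]
  simp

theorem pvOrder_iff (l : List Char) (hbal : pvBal l) :
    ((List.range (l.count 'c')).all (fun i =>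
      decide (((pvOcc 'c' l).map Int.ofNat).getD i 0 < ((pvOcc 'r' l).map Int.ofNat).getD i 0
        ∧ ((pvOcc 'r' l).map Int.ofNat).getD i 0 < ((pvOcc 'o' l).map Int.ofNat).getD i 0
        ∧ ((pvOcc 'o' l).map Int.ofNat).getD i 0 < ((pvOcc 'a' l).map Int.ofNat).getD i 0
        ∧ ((pvOcc 'a' l).map Int.ofNat).getD i 0 < ((pvOcc 'k' l).map Int.ofNat).getD i 0)) = true)
    ↔ pvOk l := by
  obtain ⟨hbr, hbo, hba, hbk⟩ := hbal
  have lC : (pvOcc 'c' l).length = l.count 'c' := pvOcc_length _ _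
  have lR : (pvOcc 'r' l).length = l.count 'c' := by rw [pvOcc_length]; omega
  have lO : (pvOcc 'o' l).length = l.count 'c' := by rw [pvOcc_length]; omega
  have lA : (pvOcc 'a' l).length = l.count 'c' := by rw [pvOcc_length]; omega
  have lK : (pvOcc 'k' l).length = l.count 'c' := by rw [pvOcc_length]; omega
  rw [← pvChain_iff l ⟨hbr, hbo, hba, hbk⟩, List.all_eq_true]
  constructor
  · intro H
    refine ⟨?_, ?_, ?_, ?_⟩ <;> rw [List.forall₂_iff_get] <;>
      refine ⟨by omega, fun i h1 h2 => ?_⟩ <;>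
      [ (have hh := H i (by rw [List.mem_range]; omega));
        (have hh := H i (by rw [List.mem_range]; omega));
        (have hh := H i (by rw [List.mem_range]; omega));
        (have hh := H i (by rw [List.mem_range]; omega))] <;>
      rw [decide_eq_true_eq] at hh <;> simp only [List.get_eq_getElem]
    · exact (pvGetD_lt _ _ i (by omega) (by omega)).mp hh.1
    · exact (pvGetD_lt _ _ i (by omega) (by omega)).mp hh.2.1
    · exact (pvGetD_lt _ _ i (by omega) (by omega)).mp hh.2.2.1
    · exact (pvGetD_lt _ _ i (by omega) (by omega)).mp hh.2.2.2
  · rintro ⟨f1, f2, f3, f4⟩ i hi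
    rw [List.mem_range] at hi
    rw [List.forall₂_iff_get] at f1 f2 f3 f4
    rw [decide_eq_true_eq]
    refine ⟨(pvGetD_lt _ _ i (by omega) (by omega)).mpr ?_,
            (pvGetD_lt _ _ i (by omega) (by omega)).mpr ?_,
            (pvGetD_lt _ _ i (by omega) (by omega)).mpr ?_,
            (pvGetD_lt _ _ i (by omega) (by omega)).mpr ?_⟩
    · simpa using f1.2 i (by omega) (by omega)
    · simpa using f2.2 i (by omega) (by omega)
    · simpa using f3.2 i (by omega) (by omega)
    · simpa using f4.2 i (by omega) (by omega)

theorem pvMain (l : List Char)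
    (hpre : l = [] ∨ l.any (fun ch => ch ∈ (['c', 'r', 'o', 'a', 'k'] : List Char)) = true) :
    (if l = [] then (0 : Int)
     else
      let positions := pvA_positions l
      let num := (positions.getD 'c' []).length
      if ¬ ("croak".toList.all (fun ch => (positions.getD ch []).length == num)) then -1
      else if ¬ ((List.range num).all (fun i =>
          decide ((positions.getD 'c' []).getD i 0 < (positions.getD 'r' []).getD i 0
            ∧ (positions.getD 'r' []).getD i 0 < (positions.getD 'o' []).getD i 0
            ∧ (positions.getD 'o' []).getD i 0 < (positions.getD 'a' []).getD i 0
            ∧ (positions.getD 'a' []).getD i 0 < (positions.getD 'k' []).getD i 0))) then -1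
      else pvA_sweep (positions.getD 'c' []).tail (positions.getD 'k' []) 1 1)
    = pvB_loop l 0 0 0 0 0 0 0 := by
  by_cases hnil : l = []
  · subst hnil
    simp [pvB_loop]
  · rw [if_neg hnil]
    simp only [pvPositions_getD, List.length_map, pvOcc_length]
    have hcroak : "croak".toList = ['c', 'r', 'o', 'a', 'k'] := rfl
    have hb1 : (("croak".toList.all (fun ch => l.count ch == l.count 'c')) = true) ↔ pvBal l := by
      rw [hcroak]
      simp only [List.all_cons, List.all_nil, Bool.and_true, Bool.and_eq_true, beq_iff_eq]
      unfold pvBal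
      tauto
    by_cases hBal : pvBal l
    · rw [if_neg (not_not_intro (hb1.mpr hBal))]
      by_cases hOk : pvOk l
      · rw [if_neg (not_not_intro ((pvOrder_iff l hBal).mpr hOk))]
        have hn : 1 ≤ l.count 'c' := by
          rcases hpre with h | h
          · exact absurd h hnil
          · rw [List.any_eq_true] at h
            obtain ⟨ch, hmem, hch⟩ := h
            have hcnt : 1 ≤ l.count ch := List.count_pos_iff.mpr hmem
            obtain ⟨h1, h2, h3, h4⟩ := hBal
            simp only [List.mem_cons, List.not_mem_nil, or_false, decide_eq_true_eq] at hch
            rcases hch with rfl | rfl | rfl | rfl | rfl <;> omega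
        have hCne : pvOcc 'c' l ≠ [] := by
          intro h
          have := pvOcc_length 'c' l
          rw [h] at this
          simp at this
          omega
        obtain ⟨c0, ct, hC⟩ := List.exists_cons_of_ne_nil hCne
        have hkall := pvK_after_c0 l hOk hBal c0 ct hC
        have hcttail : ∀ z ∈ ct, c0 < z := (List.pairwise_cons.mp (hC ▸ pvOcc_sorted 'c' l)).1
        have hct : ct = (pvOcc 'c' l).filter (fun y => decide (c0 + 1 ≤ y)) := by
          rw [hC, List.filter_cons]
          have hxx : ¬ (c0 + 1 ≤ c0) := by omega
          simp only [hxx, decide_false, Bool.false_eq_true, if_false]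
          refine (List.filter_eq_self.mpr ?_).symm
          intro z hz
          simpa using hcttail z hz
        have hkfil : (pvOcc 'k' l).filter (fun y => decide (c0 + 1 ≤ y)) = pvOcc 'k' l :=
          List.filter_eq_self.mpr (fun y hy => by simpa using hkall y hy)
        have hcur : (1 : Int) = ((pvOcc 'c' l).countP (fun x => decide (x < c0 + 1)) : Int)
            - ((pvOcc 'k' l).countP (fun x => decide (x < c0 + 1)) : Int) := by
          have hc1 : (pvOcc 'c' l).countP (fun x => decide (x < c0 + 1)) = 1 := by
            rw [hC, List.countP_cons]
            simp
            intro z hz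
            exact hcttail z hz
          have hk0 : (pvOcc 'k' l).countP (fun x => decide (x < c0 + 1)) = 0 :=
            List.countP_eq_zero.mpr (fun z hz => by simpa using hkall z hz)
          rw [hc1, hk0]
          simp
        have hsw := pvSweep_eq (pvOcc 'c' l) (pvOcc 'k' l) (pvOcc_sorted 'c' l)
          (pvOcc_sorted 'k' l) (pvOcc_disjoint l 'c' 'k' (by decide)) ct (c0 + 1) 1 1
          hct hcur (le_refl 1)
        rw [hkfil] at hsw
        have hvals : ct.map (fun x =>
              ((pvOcc 'c' l).countP (fun y => decide (y < x + 1)) : Int)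
                - ((pvOcc 'k' l).countP (fun y => decide (y < x + 1)) : Int))
            = ct.map (fun x => pvVal l (x + 1)) :=
          List.map_congr_left (fun x _ => by
            unfold pvVal pvCnt
            rw [← pvOcc_countP, ← pvOcc_countP])
        rw [hvals] at hsw
        have htail : ((pvOcc 'c' l).map Int.ofNat).tail = ct.map Int.ofNat := by
          rw [hC, List.map_cons]
          rfl
        rw [htail, hsw, pvFold_eq l hOk hBal c0 ct hC, ((pvB_spec l).1 ⟨hOk, hBal⟩).symm]
      · rw [if_pos (fun hX => hOk ((pvOrder_iff l hBal).mp hX))]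
        exact ((pvB_spec l).2 (fun h => hOk h.1)).symm
    · rw [if_pos (fun hX => hBal (hb1.mp hX))]
      exact ((pvB_spec l).2 (fun h => hBal h.2)).symm

-- ===== VERDICT (by name: the statement is the Claim_ definition above) =====
theorem solution_950_3_spec : Claim_equal_solution_950_3 := by
  intro croakOfFrogs _hdom hpre
  unfold Spec_solution_950_3
  unfold Pre_solution_950_3 at hpre
  unfold solution_950_3 solution_950_3_alt
  exact pvMain croakOfFrogs.toList hpre
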